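-- pv_equiv track=rewrite | github.com/mwess/GreedyFHist | scripts/multiomics_dataset_registration_exhaustive_5.py | get_graph_structure
-- ===== SOURCE A (Python) =====
-- def get_graph_structure(transformations):
--     graph = {}
--     vertices = set()
--     for key in transformations.keys():
--         t, s = key.split('_')
--         if s not in graph:
--             graph[s] = []
--         graph[s].append(t)
--         vertices.add(t)
--         vertices.add(s)
--     return graph, vertices
-- ===== SOURCE B (Python) =====
-- def get_graph_structure(transformations):
--     # Two-stage group-by: split all keys, collect distinct sources in first-seen
--     # order, then build each adjacency list by a scan over the pairs per source;
--     # vertices derived from the flattened pairs.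
--     pairs = [key.split('_') for key in transformations.keys()]
--     sources = []
--     for t, s in pairs:
--         if s not in sources:
--             sources.append(s)
--     graph = {s: [t for t, s2 in pairs if s2 == s] for s in sources}
--     vertices = {x for p in pairs for x in p}
--     return graph, vertices
-- ===== Notes on version B (the rewrite author's own statement) =====
-- stated objective: alternative
-- what changed: A builds the adjacency dict and vertex set incrementally in one loop with per-key setdefault/append; B is a staged group-by: it splits all keys, collects the distinct sources in first-seen order, then builds each source's adjacency list by a separate scan over the pairs (one scan per source), and derives the vertex set from the flattened pairs. Pre_ excludes keys whose split('_') does not yield exactly two parts, where both A and B raise ValueError.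
import Mathlib
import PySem

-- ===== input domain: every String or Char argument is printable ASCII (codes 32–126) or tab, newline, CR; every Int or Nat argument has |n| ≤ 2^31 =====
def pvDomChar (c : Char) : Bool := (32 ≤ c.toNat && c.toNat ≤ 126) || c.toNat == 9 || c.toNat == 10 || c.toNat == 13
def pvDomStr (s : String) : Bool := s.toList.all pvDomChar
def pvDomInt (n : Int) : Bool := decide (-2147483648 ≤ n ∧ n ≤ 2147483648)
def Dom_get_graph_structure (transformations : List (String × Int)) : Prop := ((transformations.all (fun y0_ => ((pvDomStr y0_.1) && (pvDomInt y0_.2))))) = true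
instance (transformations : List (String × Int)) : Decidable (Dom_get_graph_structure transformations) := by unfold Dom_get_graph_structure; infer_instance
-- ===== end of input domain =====

-- B replaces A's single incremental loop by a staged group-by (split keys, collect
-- distinct sources, one scan over the pairs per source, vertices from the flattened pairs);
-- same return value on all inputs where every key splits into exactly two parts (Pre_).

-- key.split('_'): sep is the nonempty literal "_", so split? is always `some`; exact.
def pvSplitKey (k : String) : List String := (PySem.Str.split? k "_").getD []

-- ===== PORT A =====
-- one loop step of A: unpack t, s; membership-guarded insert of []; append; add both vertices.
-- (the `| _` branch is unreachable under Pre_: Python raises ValueError there)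
def pvStepA (st : PySem.Dict String (List String) × PySem.Set String) (key : String) :
    PySem.Dict String (List String) × PySem.Set String :=
  match pvSplitKey key with
  | [t, s] =>
      let g := if st.1.contains s then st.1 else st.1.insert s []
      (g.modify s [] (fun l => l ++ [t]), PySem.Set.add (PySem.Set.add st.2 t) s)
  | _ => st

def get_graph_structure (transformations : List (String × Int)) : (List (String × List String)) × List String :=
  -- iteration over transformations.keys(): distinct keys in first-insertion order
  let r := (PySem.List.dedup (transformations.map Prod.fst)).foldl pvStepA (PySem.Dict.empty, PySem.Set.empty)
  (r.1.items, r.2)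

-- ===== PORT B =====
-- `if s not in sources: sources.append(s)` over the unpacked pairs
def pvStepSrc (acc : PySem.Set String) (p : List String) : PySem.Set String :=
  match p with
  | [_, s] => PySem.Set.add acc s
  | _ => acc

-- `[t for t, s2 in pairs if s2 == s]`
def pvCollect (pairs : List (List String)) (s : String) : List String :=
  pairs.filterMap (fun p => match p with
    | [t, s2] => if s2 == s then some t else none
    | _ => none)

def get_graph_structure_alt (transformations : List (String × Int)) : (List (String × List String)) × List String :=
  let pairs := (PySem.List.dedup (transformations.map Prod.fst)).map pvSplitKey
  let sources := pairs.foldl pvStepSrc PySem.Set.empty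
  let graph := sources.map (fun s => (s, pvCollect pairs s))
  let vertices : PySem.Set String := PySem.Set.ofList pairs.flatten
  (graph, vertices)

-- ===== PRECONDITION & SPEC =====
-- Pre_ excludes exactly the inputs where Python's unpacking of key.split('_') raises
-- ValueError (a key with no '_' or more than one '_'): both A and B raise there.
def Pre_get_graph_structure (transformations : List (String × Int)) : Prop :=
  ∀ p ∈ transformations, (pvSplitKey p.1).length = 2
instance (transformations : List (String × Int)) : Decidable (Pre_get_graph_structure transformations) := by unfold Pre_get_graph_structure; infer_instance
def pvWitness_get_graph_structure : (List (String × Int)) := [("a_b", 1), ("c_b", 2)]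
def Spec_get_graph_structure (transformations : List (String × Int)) (out : (List (String × List String)) × List String) : Prop := out = get_graph_structure_alt transformations
instance (transformations : List (String × Int)) (out : (List (String × List String)) × List String) : Decidable (Spec_get_graph_structure transformations out) := by unfold Spec_get_graph_structure; infer_instance

-- ===== CLAIM (what is proved, stated in full; the proofs are below) =====
def Claim_equal_get_graph_structure : Prop := ∀ (transformations : List (String × Int)), Dom_get_graph_structure transformations → Pre_get_graph_structure transformations → Spec_get_graph_structure transformations (get_graph_structure transformations)

-- ===== LEMMAS AND PROOFS =====

-- (s, t) projection of a key that splits as [t, s]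
def pvKeyProd (k : String) : String × String :=
  match pvSplitKey k with
  | [t, s] => (s, t)
  | _ => ("", "")

theorem modify_if_contains_insert {κ ν : Type} [BEq κ] [LawfulBEq κ] (d : PySem.Dict κ ν) (s : κ) (d0 : ν) (f : ν → ν) :
    ((if d.contains s then d else d.insert s d0).modify s d0 f) = d.modify s d0 f := by
  unfold PySem.Dict.modify PySem.Dict.insert PySem.Dict.contains PySem.Dict.getD PySem.Dict.get?
  by_cases h : d.items.any (fun p => p.1 == s) = true
  · simp [h]
  · have h' : ∀ p ∈ d.items, (p.1 == s) = false := by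
      intro p hp
      by_contra hc
      exact h (List.any_eq_true.mpr ⟨p, hp, by simpa using hc⟩)
    have hfind : List.find? (fun (p : κ × ν) => p.1 == s) d.items = none :=
      List.find?_eq_none.mpr (fun p hp => by simp [h' p hp])
    simp [h, List.any_append, List.find?_append, hfind, List.map_append]
    conv_rhs => rw [← List.map_id d.items]
    exact List.map_congr_left (fun p hp => by simp [h' p hp])

-- A's fold, decomposed into a dict-building modify fold (over (s,t) pairs) and a vertex fold
theorem foldA_decomp (keys : List String) (hk : ∀ k ∈ keys, (pvSplitKey k).length = 2)
    (g : PySem.Dict String (List String)) (v : PySem.Set String) :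
    keys.foldl pvStepA (g, v) =
      ((keys.map pvKeyProd).foldl (fun d p => d.modify p.1 [] (fun l => l ++ [p.2])) g,
       (keys.map pvSplitKey).foldl (fun v p => p.foldl PySem.Set.add v) v) := by
  induction keys generalizing g v with
  | nil => rfl
  | cons k ks ih =>
      obtain ⟨t, s, hts⟩ : ∃ t s, pvSplitKey k = [t, s] := by
        have := hk k (by simp)
        match h : pvSplitKey k with
        | [t, s] => exact ⟨t, s, rfl⟩
        | [] | [_] | _ :: _ :: _ :: _ => rw [h] at this; simp at this
      simp only [List.foldl_cons, List.map_cons]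
      rw [show pvStepA (g, v) k =
            (g.modify s [] (fun l => l ++ [t]), (pvSplitKey k).foldl PySem.Set.add v) by
          simp only [pvStepA, hts]
          rw [modify_if_contains_insert]
          rfl]
      rw [show pvKeyProd k = (s, t) by simp [pvKeyProd, hts]]
      exact ih (fun k hk' => hk k (by simp [hk'])) _ _

-- B's source loop is the fold of Set.add over the sources of the pairs
theorem srcFold_eq (keys : List String) (hk : ∀ k ∈ keys, (pvSplitKey k).length = 2)
    (acc : PySem.Set String) :
    (keys.map pvSplitKey).foldl pvStepSrc acc =
      ((keys.map pvKeyProd).map Prod.fst).foldl PySem.Set.add acc := by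
  induction keys generalizing acc with
  | nil => rfl
  | cons k ks ih =>
      obtain ⟨t, s, hts⟩ : ∃ t s, pvSplitKey k = [t, s] := by
        have := hk k (by simp)
        match h : pvSplitKey k with
        | [t, s] => exact ⟨t, s, rfl⟩
        | [] | [_] | _ :: _ :: _ :: _ => rw [h] at this; simp at this
      simp only [List.map_cons, List.foldl_cons]
      rw [show pvStepSrc acc (pvSplitKey k) = PySem.Set.add acc s by simp [pvStepSrc, hts],
          show (pvKeyProd k).1 = s by simp [pvKeyProd, hts]]
      exact ih (fun k hk' => hk k (by simp [hk'])) _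

-- B's per-source comprehension equals filtering the (s,t) pairs
theorem collect_eq (keys : List String) (hk : ∀ k ∈ keys, (pvSplitKey k).length = 2)
    (s : String) :
    pvCollect (keys.map pvSplitKey) s =
      (((keys.map pvKeyProd).filter (fun p => p.1 == s)).map (·.2)) := by
  induction keys with
  | nil => rfl
  | cons k ks ih =>
      obtain ⟨t, s', hts⟩ : ∃ t s', pvSplitKey k = [t, s'] := by
        have := hk k (by simp)
        match h : pvSplitKey k with
        | [t, s'] => exact ⟨t, s', rfl⟩
        | [] | [_] | _ :: _ :: _ :: _ => rw [h] at this; simp at this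
      have ih' := ih (fun k hk' => hk k (by simp [hk']))
      simp only [List.map_cons]
      rw [show pvKeyProd k = (s', t) by simp [pvKeyProd, hts]]
      unfold pvCollect at ih' ⊢
      rw [List.filterMap_cons, hts]
      by_cases hss : (s' == s) = true
      · rw [List.filter_cons_of_pos (by simpa using hss)]
        simp only [hss, if_true, List.map_cons]
        rw [ih']
      · rw [List.filter_cons_of_neg (by simpa using hss)]
        simp only [Bool.not_eq_true] at hss
        rw [ih']
        simp [hss]

-- ===== VERDICT (by name: the statement is the Claim_ definition above) =====
theorem get_graph_structure_spec : Claim_equal_get_graph_structure := by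
  intro transformations _ hpre
  unfold Spec_get_graph_structure get_graph_structure get_graph_structure_alt
  have hk : ∀ k ∈ PySem.List.dedup (transformations.map Prod.fst), (pvSplitKey k).length = 2 := by
    intro k hkmem
    rw [PySem.List.mem_dedup] at hkmem
    obtain ⟨p, hp, rfl⟩ := List.mem_map.mp hkmem
    exact hpre p hp
  set keys := PySem.List.dedup (transformations.map Prod.fst) with hkeys
  set D := (keys.map pvKeyProd).foldl (fun d p => d.modify p.1 [] (fun l => l ++ [p.2])) PySem.Dict.empty with hDdef
  have hnd : D.keys.Nodup :=
    PySem.Dict.nodup_keys_foldl_modify_key (keys.map pvKeyProd) Prod.fst []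
      (fun _ p l => l ++ [p.2]) PySem.Dict.empty PySem.Dict.nodup_keys_empty
  have hkeysD : D.keys = PySem.Set.ofList ((keys.map pvKeyProd).map Prod.fst) := by
    have h1 := PySem.Dict.keys_foldl_modify_key (keys.map pvKeyProd) Prod.fst []
      (fun _ p l => l ++ [p.2]) PySem.Dict.empty
    simpa [PySem.Dict.keys_empty, PySem.Set.update_empty] using h1
  have hsources : (keys.map pvSplitKey).foldl pvStepSrc PySem.Set.empty = D.keys := by
    rw [srcFold_eq keys hk, hkeysD, PySem.Set.ofList_eq_foldl]
    rfl
  have hval : ∀ s, D.getD s [] = pvCollect (keys.map pvSplitKey) s := by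
    intro s
    have h2 := PySem.Dict.getD_foldl_modify_append (keys.map pvKeyProd) PySem.Dict.empty s
    rw [collect_eq keys hk s]
    simpa [PySem.Dict.getD_empty] using h2
  show ((keys.foldl pvStepA (PySem.Dict.empty, PySem.Set.empty)).1.items,
        (keys.foldl pvStepA (PySem.Dict.empty, PySem.Set.empty)).2) =
       (((keys.map pvSplitKey).foldl pvStepSrc PySem.Set.empty).map
          (fun s => (s, pvCollect (keys.map pvSplitKey) s)),
        PySem.Set.ofList (keys.map pvSplitKey).flatten)
  rw [foldA_decomp keys hk]
  have hvert : (keys.map pvSplitKey).foldl (fun v p => p.foldl PySem.Set.add v) PySem.Set.empty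
      = PySem.Set.ofList (keys.map pvSplitKey).flatten := by
    simp only [PySem.Set.ofList_eq_foldl, List.foldl_flatten]
    rfl
  rw [hvert, hsources, PySem.Dict.items_eq_map_keys D hnd []]
  refine congrArg₂ Prod.mk ?_ rfl
  exact List.map_congr_left (fun s _ => by rw [hval s])
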